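-- pv_equiv track=rewrite | github.com/MalongSuper/Python-Programming---Algorithms | RollingHashFunction.py | rolling_hash_code
-- ===== SOURCE A (Python) =====
-- def rolling_hash_code(x, y):  # Return the hash code of X and Y
--     res_y = {}
--     # Calculate hash code for pattern Y
--     n = 0
--     for i in range(len(y)):
--         n += ord(y[i])
--     res_y[y] = n  # Append to dictionary
--     # Calculate hash code for every sub-string X
--     sub_string = []
--     for j, k in zip(range(len(x)), range(len(y), len(x) + 1, 1)):
--         sub_string.append(x[j:k])
--     res_x = {}
--     for m in sub_string:
--         res_x[m] = sum(ord(i) for i in m)   # Append to dictionary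
--     return res_x, res_y
-- ===== SOURCE B (Python) =====
-- def rolling_hash_code(x, y):  # Rolling sum: one pass, subtract outgoing char, add incoming char
--     m, n = len(y), len(x)
--     res_y = {y: sum(map(ord, y))}
--     res_x = {}
--     if m <= n:
--         s = sum(map(ord, x[:m]))
--         for j in range(n - m + 1):
--             res_x[x[j:j + m]] = s
--             if j + m < n:
--                 s += ord(x[j + m]) - ord(x[j])
--     return res_x, res_y
-- ===== Notes on version B (the rewrite author's own statement) =====
-- stated objective: faster
-- what changed: Replaces the per-window recomputation of each substring's character-code sum (O(n*m)) by a single-pass rolling sum that subtracts the outgoing and adds the incoming character per window.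
-- outside the precondition, e.g. on rolling_hash_code('', ''): A returns ({}, {'': 0}), B returns ({'': 0}, {'': 0})
import Mathlib
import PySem

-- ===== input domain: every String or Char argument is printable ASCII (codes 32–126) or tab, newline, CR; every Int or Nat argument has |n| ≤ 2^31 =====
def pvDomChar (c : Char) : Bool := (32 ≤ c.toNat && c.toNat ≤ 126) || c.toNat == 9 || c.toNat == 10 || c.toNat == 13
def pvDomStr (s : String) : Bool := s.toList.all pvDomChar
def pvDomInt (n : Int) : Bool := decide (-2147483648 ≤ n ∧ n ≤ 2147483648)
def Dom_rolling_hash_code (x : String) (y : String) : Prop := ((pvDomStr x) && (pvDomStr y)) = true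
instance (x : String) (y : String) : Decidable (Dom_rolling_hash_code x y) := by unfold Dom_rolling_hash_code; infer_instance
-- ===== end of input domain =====

-- B replaces A's per-window substring-sum recomputation by a single-pass rolling sum (faster; asymptotic).
-- Pre_ excludes only x = "" ∧ y = "", where A yields no window but B yields the one empty window — both defensible.


-- ord(c), shared by both ports
def pvCode (c : Char) : Int := (c.toNat : Int)

-- ===== PORT A =====
def rolling_hash_code (x : String) (y : String) : (List (String × Int)) × (List (String × Int)) :=
  let ycs := y.toList
  let xcs := x.toList
  -- n = 0; for i in range(len(y)): n += ord(y[i])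
  let n : Int := (List.range ycs.length).foldl (fun acc i => acc + pvCode (ycs.getD i ' ')) 0
  -- res_y[y] = n   (index i is always in range, so getD's default is never read)
  let res_y : PySem.Dict String Int := PySem.Dict.empty.insert y n
  -- sub_string built from zip(range(len(x)), range(len(y), len(x)+1, 1))
  let sub_string : List String :=
    ((List.range xcs.length).zip (PySem.List.pyRange (ycs.length : Int) ((xcs.length : Int) + 1) 1)).foldl
      (fun acc jk => acc ++ [String.ofList (PySem.List.slice xcs (some (jk.1 : Int)) (some jk.2))]) []
  -- res_x[m] = sum(ord(i) for i in m)
  let res_x : PySem.Dict String Int :=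
    sub_string.foldl (fun d s => d.insert s ((s.toList.map pvCode).sum)) PySem.Dict.empty
  (res_x.items, res_y.items)

-- ===== PORT B =====
def rolling_hash_code_alt (x : String) (y : String) : (List (String × Int)) × (List (String × Int)) :=
  let ycs := y.toList
  let xcs := x.toList
  let m := ycs.length
  let n := xcs.length
  let res_y : PySem.Dict String Int := PySem.Dict.empty.insert y ((ycs.map pvCode).sum)
  let res_x : PySem.Dict String Int :=
    if m ≤ n then
      ((List.range (n - m + 1)).foldl
        (fun (st : PySem.Dict String Int × Int) (j : Nat) =>
          (st.1.insert (String.ofList (PySem.List.slice xcs (some (j : Int)) (some ((j : Int) + (m : Int))))) st.2,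
           if j + m < n then st.2 + pvCode (xcs.getD (j + m) ' ') - pvCode (xcs.getD j ' ') else st.2))
        (PySem.Dict.empty, ((PySem.List.slice xcs none (some (m : Int))).map pvCode).sum)).1
    else PySem.Dict.empty
  (res_x.items, res_y.items)

-- ===== PRECONDITION & SPEC =====
-- Pre_ excludes only the single input x = "" ∧ y = "": there A returns ({}, {'': 0}) (zero windows, an
-- artefact of zip) while B returns ({'': 0}, {'': 0}) (the one empty window) — both are defensible.
def Pre_rolling_hash_code (x : String) (y : String) : Prop := ¬ (x = "" ∧ y = "")
instance (x : String) (y : String) : Decidable (Pre_rolling_hash_code x y) := by unfold Pre_rolling_hash_code; infer_instance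
def pvWitness_rolling_hash_code : String × String := ("abcab", "ab")

def Spec_rolling_hash_code (x : String) (y : String) (out : (List (String × Int)) × (List (String × Int))) : Prop := out = rolling_hash_code_alt x y
instance (x : String) (y : String) (out : (List (String × Int)) × (List (String × Int))) : Decidable (Spec_rolling_hash_code x y out) := by unfold Spec_rolling_hash_code; infer_instance

-- ===== CLAIM (what is proved, stated in full; the proofs are below) =====
def Claim_equal_rolling_hash_code : Prop := ∀ (x : String) (y : String), Dom_rolling_hash_code x y → Pre_rolling_hash_code x y → Spec_rolling_hash_code x y (rolling_hash_code x y)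

-- ===== LEMMAS AND PROOFS =====

-- window of length m starting at j, and a list's code sum (proof-side notions)
def pvWin (xcs : List Char) (m j : Nat) : List Char := (xcs.drop j).take m
def pvSum (cs : List Char) : Int := (cs.map pvCode).sum

theorem pvSum_append (a b : List Char) : pvSum (a ++ b) = pvSum a + pvSum b := by
  simp [pvSum]

-- A's index loop over y is the code sum of y
theorem pvYsum (ycs : List Char) :
    (List.range ycs.length).foldl (fun acc i => acc + pvCode (ycs.getD i ' ')) 0
      = (ycs.map pvCode).sum := by
  rw [PySem.List.foldl_add]
  have h : (List.range ycs.length).map (fun i => ycs.getD i ' ') = ycs := by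
    apply List.ext_getElem
    · simp
    · intro i h1 h2
      simp [List.getD_eq_getElem?_getD, List.getElem?_eq_getElem h2]
  conv_rhs => rw [← h]
  simp [List.map_map, Function.comp_def]

theorem pvZipRange (n L : Nat) :
    (List.range n).zip (List.range L) = (List.range (min n L)).map (fun j => (j, j)) := by
  apply List.ext_getElem
  · simp
  · intro i h1 h2; simp

-- the rolling-sum identity: slide the window one step
theorem pvWin_sum_roll (xcs : List Char) (m j : Nat) (h : j + m < xcs.length) :
    pvSum (pvWin xcs m (j + 1)) =
      pvSum (pvWin xcs m j) + pvCode (xcs.getD (j + m) ' ') - pvCode (xcs.getD j ' ') := by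
  have hj : j < xcs.length := by omega
  have hdrop : xcs.drop j = xcs[j] :: xcs.drop (j + 1) := List.drop_eq_getElem_cons hj
  have hm : m < (xcs.drop j).length := by simp; omega
  have h1 : pvSum ((xcs.drop j).take (m + 1))
      = pvSum ((xcs.drop j).take m) + pvCode xcs[j + m] := by
    rw [List.take_add_one, pvSum_append]
    have : (xcs.drop j)[m]? = some xcs[j + m] := by
      rw [List.getElem?_drop, List.getElem?_eq_getElem (by omega)]
    rw [this]; simp [pvSum]
  have h2 : pvSum ((xcs.drop j).take (m + 1))
      = pvCode xcs[j] + pvSum ((xcs.drop (j + 1)).take m) := by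
    rw [hdrop, List.take_succ_cons]; simp [pvSum]
  have hg1 : xcs.getD (j + m) ' ' = xcs[j + m] := List.getD_eq_getElem _ _ h
  have hg2 : xcs.getD j ' ' = xcs[j] := List.getD_eq_getElem _ _ hj
  unfold pvWin
  rw [hg1, hg2]; omega

-- B's paired fold, with the running sum correct at entry, is A's insert fold
theorem pvBfold (xcs : List Char) (m : Nat) :
    ∀ (k a : Nat) (d : PySem.Dict String Int) (s : Int),
      a + k ≤ xcs.length - m + 1 → m ≤ xcs.length → s = pvSum (pvWin xcs m a) →
      ((List.range' a k).foldl
          (fun (st : PySem.Dict String Int × Int) (j : Nat) =>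
            (st.1.insert (String.ofList (PySem.List.slice xcs (some (j : Int)) (some ((j : Int) + (m : Int))))) st.2,
             if j + m < xcs.length then st.2 + pvCode (xcs.getD (j + m) ' ') - pvCode (xcs.getD j ' ') else st.2))
          (d, s)).1
        = (List.range' a k).foldl
            (fun d j => d.insert (String.ofList (pvWin xcs m j)) (pvSum (pvWin xcs m j))) d := by
  intro k
  induction k with
  | zero => intro a d s _ _ _; simp
  | succ k ih =>
    intro a d s hak hm hs
    rw [List.range'_succ]
    simp only [List.foldl_cons]
    rw [PySem.List.slice_natCast_add, hs]
    cases k with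
    | zero => rfl
    | succ k' =>
      apply ih
      · omega
      · exact hm
      · have hlt : a + m < xcs.length := by omega
        rw [if_pos hlt]
        exact (pvWin_sum_roll xcs m a hlt).symm

-- repeated insertion of one fixed pair is a single insertion
theorem pvFoldInsertConst (key : String) (v : Int) :
    ∀ (l : List Nat) (d : PySem.Dict String Int), l ≠ [] →
      l.foldl (fun d _ => d.insert key v) d = d.insert key v := by
  intro l
  induction l with
  | nil => intro d h; exact absurd rfl h
  | cons a t ih =>
    intro d _
    cases t with
    | nil => simp
    | cons b t' =>
      simp only [List.foldl_cons]
      rw [← List.foldl_cons]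
      rw [ih (d.insert key v) (by simp), PySem.Dict.insert_insert_self]

-- A's substring list is the window list
theorem pvSubA (xcs : List Char) (m : Nat) :
    (((List.range xcs.length).zip (PySem.List.pyRange (m : Int) ((xcs.length : Int) + 1) 1)).foldl
        (fun acc jk => acc ++ [String.ofList (PySem.List.slice xcs (some (jk.1 : Int)) (some jk.2))]) [])
      = (List.range (min xcs.length (((xcs.length : Int) + 1 - (m : Int)).toNat))).map
          (fun j => String.ofList (pvWin xcs m j)) := by
  rw [PySem.List.foldl_append_singleton_eq_map, List.nil_append]
  rw [PySem.List.pyRange_one, List.zip_map_right, pvZipRange, List.map_map, List.map_map]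
  apply List.map_congr_left
  intro j _
  simp only [Function.comp, Prod.map_apply, id]
  have : (m : Int) + (j : Int) = (j : Int) + (m : Int) := by ring
  rw [this, PySem.List.slice_natCast_add]
  rfl

-- ===== VERDICT (by name: the statement is the Claim_ definition above) =====
theorem rolling_hash_code_spec : Claim_equal_rolling_hash_code := by
  unfold Claim_equal_rolling_hash_code
  intro x y _ hpre
  unfold Spec_rolling_hash_code rolling_hash_code rolling_hash_code_alt
  simp only []
  refine congrArg₂ Prod.mk ?_ ?_
  · -- res_x
    rw [pvSubA, List.foldl_map]
    by_cases hmn : y.toList.length ≤ x.toList.length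
    · rw [if_pos hmn]
      simp only [String.toList_ofList]
      conv_rhs => rw [List.range_eq_range']
      rw [pvBfold x.toList y.toList.length (x.toList.length - y.toList.length + 1) 0
          PySem.Dict.empty
          ((List.map pvCode (PySem.List.slice x.toList none (some (y.toList.length : Int)))).sum)
          (by omega) hmn
          (by rw [PySem.List.slice_to_natCast]; simp [pvWin, pvSum])]
      by_cases hm0 : y.toList.length = 0
      · -- empty pattern: every window is the empty string; both folds collapse to one insertion
        have hx : x.toList ≠ [] := by
          intro hxe
          refine hpre ⟨by rwa [← String.toList_eq_nil_iff], by rw [← String.toList_eq_nil_iff]; exact List.eq_nil_of_length_eq_zero hm0⟩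
        have hn1 : 1 ≤ x.toList.length := List.length_pos_of_ne_nil hx
        simp only [hm0, pvWin, pvSum, List.take_zero, List.map_nil, List.sum_nil]
        have e1 : List.range (min x.toList.length (((x.toList.length : Int) + 1 - ((0:Nat) : Int)).toNat)) ≠ [] := by
          simp only [ne_eq, List.range_eq_nil]
          omega
        have e2 : List.range' 0 (x.toList.length - 0 + 1) ≠ [] := by
          simp
        rw [pvFoldInsertConst _ _ _ _ e1, pvFoldInsertConst _ _ _ _ e2]
      · -- nonempty pattern: the two index ranges coincide
        have hL : min x.toList.length (((x.toList.length : Int) + 1 - (y.toList.length : Int)).toNat)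
            = x.toList.length - y.toList.length + 1 := by omega
        rw [hL, List.range_eq_range']
        simp only [pvSum]
    · rw [if_neg hmn]
      have hL : min x.toList.length (((x.toList.length : Int) + 1 - (y.toList.length : Int)).toNat) = 0 := by
        omega
      rw [hL]
      simp
  · -- res_y
    rw [pvYsum]
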